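-- pv_equiv track=rewrite | github.com/MistreanuEmanuela/PYTHON | Lab2/main.py | compose
-- ===== SOURCE A (Python) =====
-- def compose(notes, positions, start_position):
--     song = []
--     position = start_position
--     song.append(notes[position])
--     for i in positions:
--         position = (position + i) % len(notes)
--         song.append(notes[position])
--     return song
-- ===== SOURCE B (Python) =====
-- def compose(notes, positions, start_position):
--     n = len(notes)
--     first = notes[start_position]
--
--     def walk(ps, pos):
--         # notes visited after performing the steps ps, starting from index pos (already reduced mod n)
--         if not ps:
--             return []
--         if len(ps) == 1:
--             return [notes[(pos + ps[0]) % n]]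
--         mid = len(ps) // 2
--         left = ps[:mid]
--         return walk(left, pos) + walk(ps[mid:], (pos + sum(left)) % n)
--
--     return [first] + walk(positions, start_position % n)
-- ===== Notes on version B (the rewrite author's own statement) =====
-- stated objective: alternative
-- what changed: Replaces A's single left-to-right running-index loop with a divide-and-conquer recursion: the step list is split in half, the right half is walked from the start index advanced by the left half's total sum mod len(notes), and the two note lists are concatenated; correctness rests on modular prefix-sum homomorphism.
import Mathlib
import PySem

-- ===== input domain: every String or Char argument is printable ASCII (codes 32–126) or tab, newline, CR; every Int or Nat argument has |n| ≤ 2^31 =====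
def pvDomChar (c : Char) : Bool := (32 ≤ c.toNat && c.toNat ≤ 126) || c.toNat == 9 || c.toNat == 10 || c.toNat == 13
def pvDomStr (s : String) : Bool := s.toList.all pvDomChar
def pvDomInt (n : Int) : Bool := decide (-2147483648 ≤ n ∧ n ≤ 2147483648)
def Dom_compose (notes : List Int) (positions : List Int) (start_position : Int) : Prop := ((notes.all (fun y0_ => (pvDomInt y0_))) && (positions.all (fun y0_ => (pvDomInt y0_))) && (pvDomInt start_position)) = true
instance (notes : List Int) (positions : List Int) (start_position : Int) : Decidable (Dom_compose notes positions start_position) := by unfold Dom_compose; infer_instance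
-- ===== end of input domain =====

-- B replaces A's running-index loop with a divide-and-conquer recursion over the step list
-- (right half walked from the index advanced by the left half's sum mod n); alternative, not faster.

-- ===== PORT A =====
def compose (notes : List Int) (positions : List Int) (start_position : Int) : List Int :=
  let song : List Int := [PySem.List.pyGetD notes start_position 0]
  let st := positions.foldl
    (fun (st : Int × List Int) i =>
      let p := PySem.Int.mod (st.1 + i) (notes.length : Int)
      (p, st.2 ++ [PySem.List.pyGetD notes p 0]))
    (start_position, song)
  st.2

-- ===== PORT B =====
-- the inner helper `walk` of Source B; ps[:mid]/ps[mid:] with 0 ≤ mid ≤ len are exactly take/drop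
def walk (notes : List Int) (n : Int) (ps : List Int) (pos : Int) : List Int :=
  if ps = [] then []
  else if ps.length = 1 then [PySem.List.pyGetD notes (PySem.Int.mod (pos + ps.headI) n) 0]
  else
    let mid := ps.length / 2
    let left := ps.take mid
    walk notes n left pos ++
      walk notes n (ps.drop mid) (PySem.Int.mod (pos + left.sum) n)
termination_by ps.length
decreasing_by
  all_goals
    rename_i h0 h1
    have h0' : ps.length ≠ 0 := fun h => h0 (List.length_eq_zero_iff.mp h)
    simp only [List.length_take, List.length_drop]
    omega

def compose_alt (notes : List Int) (positions : List Int) (start_position : Int) : List Int :=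
  let n : Int := notes.length
  let first := PySem.List.pyGetD notes start_position 0
  first :: walk notes n positions (PySem.Int.mod start_position n)

-- ===== PRECONDITION & SPEC =====
-- Pre_ excludes exactly the inputs where A raises IndexError: empty notes, or a
-- start_position outside Python's (negative-index-allowing) range for notes.
def Pre_compose (notes : List Int) (positions : List Int) (start_position : Int) : Prop :=
  notes ≠ [] ∧ PySem.Raise.InRange notes.length start_position
instance (notes : List Int) (positions : List Int) (start_position : Int) : Decidable (Pre_compose notes positions start_position) := by unfold Pre_compose; infer_instance

def pvWitness_compose : List Int × List Int × Int := ([4, 7, 2], [3, -1, 5], 1)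

def Spec_compose (notes : List Int) (positions : List Int) (start_position : Int) (out : List Int) : Prop := out = compose_alt notes positions start_position
instance (notes : List Int) (positions : List Int) (start_position : Int) (out : List Int) : Decidable (Spec_compose notes positions start_position out) := by unfold Spec_compose; infer_instance

-- ===== CLAIM (what is proved, stated in full; the proofs are below) =====
def Claim_equal_compose : Prop := ∀ (notes : List Int) (positions : List Int) (start_position : Int), Dom_compose notes positions start_position → Pre_compose notes positions start_position → Spec_compose notes positions start_position (compose notes positions start_position)

-- ===== LEMMAS AND PROOFS =====

-- prefix sums, proof-side characterisation device
def pyAccumulate (xs : List Int) (s : Int) : List Int :=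
  match xs with
  | [] => []
  | x :: r => (s + x) :: pyAccumulate r (s + x)

theorem pyAccumulate_append (xs ys : List Int) (s : Int) :
    pyAccumulate (xs ++ ys) s = pyAccumulate xs s ++ pyAccumulate ys (s + xs.sum) := by
  induction xs generalizing s with
  | nil => simp [pyAccumulate]
  | cons x r ih => simp [pyAccumulate, ih, add_assoc]

-- the per-element final modulo only depends on the start value mod n
theorem pyAccumulate_mod_congr (n : Int) (hn : 0 < n) :
    ∀ (xs : List Int) (a b : Int), PySem.Int.mod a n = PySem.Int.mod b n →
      (pyAccumulate xs a).map (fun q => PySem.Int.mod q n) =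
      (pyAccumulate xs b).map (fun q => PySem.Int.mod q n) := by
  intro xs
  induction xs with
  | nil => intro a b _; rfl
  | cons x r ih =>
    intro a b h
    have h' : PySem.Int.mod (a + x) n = PySem.Int.mod (b + x) n := by
      simp only [PySem.Int.mod_eq_emod_of_pos hn] at h ⊢
      rw [Int.add_emod, h, ← Int.add_emod]
    simp [pyAccumulate, h', ih _ _ h']

theorem mod_mod (n : Int) (hn : 0 < n) (a : Int) :
    PySem.Int.mod (PySem.Int.mod a n) n = PySem.Int.mod a n := by
  simp only [PySem.Int.mod_eq_emod_of_pos hn]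
  exact Int.emod_emod_of_dvd _ dvd_rfl

-- characterisation of B's divide-and-conquer: it is the map over prefix sums
theorem walk_char (notes : List Int) (hn : notes ≠ []) :
    ∀ (ps : List Int) (pos : Int),
      walk notes (notes.length : Int) ps pos
      = (pyAccumulate ps pos).map
          (fun q => PySem.List.pyGetD notes (PySem.Int.mod q (notes.length : Int)) 0) := by
  have hpos : (0 : Int) < (notes.length : Int) := by
    have := List.length_pos_of_ne_nil hn; exact_mod_cast this
  intro ps
  induction hps : ps.length using Nat.strong_induction_on generalizing ps with
  | _ k ih =>
  intro pos
  match ps with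
  | [] => simp [walk, pyAccumulate]
  | [p] => simp [walk, pyAccumulate]
  | a :: b :: r =>
    rw [walk]
    have hlen : (a :: b :: r).length = k := hps
    set l := a :: b :: r with hl
    have h2 : 2 ≤ l.length := by simp [hl]
    have hmidlt : l.length / 2 < l.length := by omega
    have hmidpos : 1 ≤ l.length / 2 := by omega
    have htk : (l.take (l.length / 2)).length = l.length / 2 := by
      simp [List.length_take]; omega
    have hdk : (l.drop (l.length / 2)).length = l.length - l.length / 2 := by
      simp [List.length_drop]
    rw [if_neg (show ¬ l = [] by simp [hl]), if_neg (show ¬ l.length = 1 by omega)]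
    simp only
    rw [ih _ (by omega) _ htk, ih _ (by omega) _ hdk]
    have hcong := pyAccumulate_mod_congr _ hpos (l.drop (l.length / 2))
      (PySem.Int.mod (pos + (l.take (l.length / 2)).sum) (notes.length : Int))
      (pos + (l.take (l.length / 2)).sum) (mod_mod _ hpos _)
    have hmap : (pyAccumulate (l.drop (l.length / 2))
          (PySem.Int.mod (pos + (l.take (l.length / 2)).sum) (notes.length : Int))).map
          (fun q => PySem.List.pyGetD notes (PySem.Int.mod q (notes.length : Int)) 0)
        = (pyAccumulate (l.drop (l.length / 2)) (pos + (l.take (l.length / 2)).sum)).map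
          (fun q => PySem.List.pyGetD notes (PySem.Int.mod q (notes.length : Int)) 0) := by
      have := congrArg (List.map (fun m => PySem.List.pyGetD notes m 0)) hcong
      simpa [List.map_map, Function.comp] using this
    rw [hmap, ← List.map_append, ← pyAccumulate_append, List.take_append_drop]

-- characterisation of A's loop: the appended tail is a map over prefix sums
theorem compose_loop_char (notes : List Int) (hn : notes ≠ []) :
    ∀ (ps : List Int) (p : Int) (song : List Int),
      (ps.foldl
        (fun (st : Int × List Int) i =>
          let q := PySem.Int.mod (st.1 + i) (notes.length : Int)
          (q, st.2 ++ [PySem.List.pyGetD notes q 0]))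
        (p, song)).2
      = song ++ (pyAccumulate ps p).map
          (fun q => PySem.List.pyGetD notes (PySem.Int.mod q (notes.length : Int)) 0) := by
  have hpos : (0 : Int) < (notes.length : Int) := by
    have := List.length_pos_of_ne_nil hn; exact_mod_cast this
  intro ps
  induction ps with
  | nil => intro p song; simp [pyAccumulate]
  | cons i r ih =>
    intro p song
    simp only [List.foldl_cons, pyAccumulate, List.map_cons]
    rw [ih]
    have hcong :
        (pyAccumulate r (PySem.Int.mod (p + i) (notes.length : Int))).map
            (fun q => PySem.Int.mod q (notes.length : Int))
        = (pyAccumulate r (p + i)).map (fun q => PySem.Int.mod q (notes.length : Int)) :=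
      pyAccumulate_mod_congr _ hpos _ _ _ (mod_mod _ hpos _)
    have : (pyAccumulate r (PySem.Int.mod (p + i) (notes.length : Int))).map
            (fun q => PySem.List.pyGetD notes (PySem.Int.mod q (notes.length : Int)) 0)
        = (pyAccumulate r (p + i)).map
            (fun q => PySem.List.pyGetD notes (PySem.Int.mod q (notes.length : Int)) 0) := by
      have := congrArg (List.map (fun m => PySem.List.pyGetD notes m 0)) hcong
      simpa [List.map_map, Function.comp] using this
    simp [this, List.append_assoc]

-- ===== VERDICT (by name: the statement is the Claim_ definition above) =====
theorem compose_spec : Claim_equal_compose := by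
  intro notes positions start_position _ hpre
  obtain ⟨hne, _⟩ := hpre
  have hpos : (0 : Int) < (notes.length : Int) := by
    have := List.length_pos_of_ne_nil hne; exact_mod_cast this
  unfold Spec_compose compose compose_alt
  simp only
  rw [compose_loop_char notes hne positions start_position, walk_char notes hne]
  have hcong := pyAccumulate_mod_congr _ hpos positions
    (PySem.Int.mod start_position (notes.length : Int)) start_position (mod_mod _ hpos _)
  have := congrArg (List.map (fun m => PySem.List.pyGetD notes m 0)) hcong
  simpa [List.map_map, Function.comp] using this.symm
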